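-- pv_equiv track=rewrite | github.com/viperleed/viperleed | src/viperleed/calc/lib/itertools_utils.py | n_wise
-- ===== SOURCE A (Python) =====
-- from collections import deque
-- from itertools import islice
--
-- def n_wise(iterable, n_items):
--     """Yield `n`-tuples of items from `iterable`."""
--     if n_items < 2:  # pylint: disable=magic-value-comparison  # Clear
--         raise ValueError('n_wise needs at least n_items=2')
--     iterable = iter(iterable)  # In case it's a Sequence
--     items = deque(islice(iterable, n_items - 1), n_items)
--     for item in iterable:
--         items.append(item)
--         yield tuple(items)
-- ===== SOURCE B (Python) =====
-- def n_wise(iterable, n_items):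
--     """Yield `n`-tuples of items from `iterable`."""
--     if n_items < 2:
--         raise ValueError('n_wise needs at least n_items=2')
--     buf = list(iterable)
--     for i in range(len(buf) - n_items + 1):
--         yield tuple(buf[i:i + n_items])
-- ===== Notes on version B (the rewrite author's own statement) =====
-- stated objective: idiomatic
-- what changed: Replaces the rolling bounded-deque state machine over a lazily consumed iterator by materializing the input once and yielding each window as a direct index slice buf[i:i+n_items].
import Mathlib
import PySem

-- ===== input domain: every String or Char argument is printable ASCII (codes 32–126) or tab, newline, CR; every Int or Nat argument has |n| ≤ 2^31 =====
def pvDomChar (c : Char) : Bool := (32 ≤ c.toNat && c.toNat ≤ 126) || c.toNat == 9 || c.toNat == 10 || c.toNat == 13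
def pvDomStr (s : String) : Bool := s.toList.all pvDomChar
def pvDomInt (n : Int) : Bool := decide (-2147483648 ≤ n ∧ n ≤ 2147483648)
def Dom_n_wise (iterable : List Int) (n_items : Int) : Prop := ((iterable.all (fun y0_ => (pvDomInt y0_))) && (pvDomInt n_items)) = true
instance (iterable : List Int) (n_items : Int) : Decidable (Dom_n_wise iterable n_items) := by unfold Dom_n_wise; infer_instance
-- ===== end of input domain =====

-- B replaces A's rolling bounded-deque state machine by the idiomatic "yield each index slice
-- buf[i:i+n_items]" formulation over the materialized list (same cost, plainer).


-- ===== PORT A =====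
-- the 'for item in iterable' loop: items is the deque (maxlen n), appending drops from
-- the left when the deque would exceed n; each iteration yields tuple(items)
def nwiseLoop (n : Nat) (items : List Int) : List Int → List (List Int)
  | [] => []
  | x :: xs =>
      let grown := items ++ [x]
      let items' := if grown.length > n then grown.drop 1 else grown
      items' :: nwiseLoop n items' xs

def n_wise (iterable : List Int) (n_items : Int) : List (List Int) :=
  if n_items < 2 then []   -- A raises ValueError here; excluded by Pre_n_wise
  else
    let n := n_items.toNat
    -- items = deque(islice(iterable, n_items - 1), n_items); then loop over the rest
    nwiseLoop n (iterable.take (n - 1)) (iterable.drop (n - 1))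

-- ===== PORT B =====
def n_wise_alt (iterable : List Int) (n_items : Int) : List (List Int) :=
  if n_items < 2 then []   -- B raises ValueError here; excluded by Pre_n_wise
  else
    -- for i in range(len(buf) - n_items + 1): yield tuple(buf[i:i+n_items])
    (PySem.List.pyRange 0 ((iterable.length : Int) - n_items + 1) 1).map
      (fun i => PySem.List.slice iterable (some i) (some (i + n_items)))

-- ===== PRECONDITION & SPEC =====
-- Pre_ excludes exactly n_items < 2, where both generators raise ValueError on first consumption.
def Pre_n_wise (iterable : List Int) (n_items : Int) : Prop := 2 ≤ n_items
instance (iterable : List Int) (n_items : Int) : Decidable (Pre_n_wise iterable n_items) := by unfold Pre_n_wise; infer_instance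
def pvWitness_n_wise : List Int × Int := ([1, 2, 3], 2)

def Spec_n_wise (iterable : List Int) (n_items : Int) (out : List (List Int)) : Prop := out = n_wise_alt iterable n_items
instance (iterable : List Int) (n_items : Int) (out : List (List Int)) : Decidable (Spec_n_wise iterable n_items out) := by unfold Spec_n_wise; infer_instance

-- ===== CLAIM (what is proved, stated in full; the proofs are below) =====
def Claim_equal_n_wise : Prop := ∀ (iterable : List Int) (n_items : Int), Dom_n_wise iterable n_items → Pre_n_wise iterable n_items → Spec_n_wise iterable n_items (n_wise iterable n_items)

-- ===== LEMMAS AND PROOFS =====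

-- Invariant: after k items have been consumed (k ≥ n-1), the deque holds the last
-- min(n, k) of the first k items, i.e. (l.take k).drop (k - n); the remaining loop
-- yields exactly the windows starting at k+1-n, …, l.length-n.
lemma nwiseLoop_windows (l : List Int) (n : Nat) (hn : 2 ≤ n) :
    ∀ d k, d = l.length - k → n - 1 ≤ k →
      nwiseLoop n ((l.take k).drop (k - n)) (l.drop k)
        = (List.range d).map (fun j => (l.drop (k + 1 - n + j)).take n) := by
  intro d
  induction d with
  | zero =>
      intro k hd _
      have hk : l.length ≤ k := by omega
      simp [List.drop_eq_nil_of_le hk, nwiseLoop]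
  | succ d ih =>
      intro k hd hk
      have hkl : k < l.length := by omega
      rw [List.drop_eq_getElem_cons hkl]
      show (let grown := (l.take k).drop (k - n) ++ [l[k]];
            let items' := if grown.length > n then grown.drop 1 else grown;
            items' :: nwiseLoop n items' (l.drop (k + 1))) = _
      have hgrown : (l.take k).drop (k - n) ++ [l[k]] = (l.take (k + 1)).drop (k - n) := by
        rw [← List.drop_append_of_le_length (by simp; omega)]
        congr 1
        rw [List.take_add_one, List.getElem?_eq_getElem hkl]
        rfl
      have hlen : ((l.take (k + 1)).drop (k - n)).length = (k + 1) - (k - n) := by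
        simp; omega
      have hitems' : (if ((l.take k).drop (k - n) ++ [l[k]]).length > n
              then ((l.take k).drop (k - n) ++ [l[k]]).drop 1
              else (l.take k).drop (k - n) ++ [l[k]])
            = (l.take (k + 1)).drop (k + 1 - n) := by
        rw [hgrown, hlen]
        by_cases hcase : n ≤ k
        · rw [if_pos (by omega), List.drop_drop]
          congr 1; omega
        · rw [if_neg (by omega)]
          congr 1; omega
      simp only [hitems']
      have hyield : (l.take (k + 1)).drop (k + 1 - n) = (l.drop (k + 1 - n)).take n := by
        rw [List.drop_take]
        congr 1; omega
      rw [ih (k + 1) (by omega) (by omega), hyield, List.range_succ_eq_map]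
      simp only [List.map_cons, List.map_map, Nat.add_zero]
      congr 1
      apply List.map_congr_left
      intro j _
      simp only [Function.comp_apply]
      congr 2
      omega

-- ===== VERDICT (by name: the statement is the Claim_ definition above) =====
theorem n_wise_spec : Claim_equal_n_wise := by
  intro l n_items _ hpre
  unfold Spec_n_wise n_wise n_wise_alt
  have h2 : ¬ n_items < 2 := not_lt.mpr hpre
  rw [if_neg h2, if_neg h2]
  obtain ⟨n, hn⟩ : ∃ n : Nat, n_items = (n : Int) := ⟨n_items.toNat, by omega⟩
  subst hn
  simp only [Int.toNat_natCast]
  have hn2 : 2 ≤ n := by omega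
  rw [PySem.List.pyRange_one]
  have hm : ((l.length : Int) - (n : Int) + 1 - 0).toNat = l.length - (n - 1) := by omega
  rw [hm]
  have hwin := nwiseLoop_windows l n hn2 (l.length - (n - 1)) (n - 1) rfl (le_refl _)
  have h0 : n - 1 - n = 0 := by omega
  rw [h0, List.drop_zero] at hwin
  rw [hwin, List.map_map]
  apply List.map_congr_left
  intro j _
  simp only [Function.comp_apply, zero_add]
  rw [PySem.List.slice_natCast_add]
  congr 2
  omega
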